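-- pv_equiv track=rewrite | github.com/paisleypark3121/chatbot-flow | main.py | set_messages
-- ===== SOURCE A (Python) =====
-- def set_messages(messages, rolling):
--     num_entries = len(messages)
--     num_couples = (num_entries - 1) // 2
--
--     if num_couples <= rolling:
--         return messages
--
--     couples_to_remove = num_couples - rolling
--
--     removed_couples = 0
--     index = 1
--     while removed_couples < couples_to_remove:
--         if messages[index]["role"] == "user" and messages[index + 1]["role"] == "assistant":
--             del messages[index]
--             del messages[index]
--             removed_couples += 1
--         else:
--             index += 1
--
--     return messages
-- ===== SOURCE B (Python) =====
-- def set_messages(messages, rolling):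
--     num_couples = (len(messages) - 1) // 2
--     if num_couples <= rolling:
--         return messages
--     to_remove = num_couples - rolling
--     out = []
--     i = 0
--     n = len(messages)
--     while i < n:
--         if (to_remove > 0 and i >= 1 and i + 1 < n
--                 and messages[i].get("role") == "user"
--                 and messages[i + 1].get("role") == "assistant"):
--             i += 2
--             to_remove -= 1
--         else:
--             out.append(messages[i])
--             i += 1
--     return out
-- ===== Notes on version B (the rewrite author's own statement) =====
-- stated objective: alternative
-- what changed: A repeatedly deletes couple elements in place (each del shifts the whole tail while the loop rescans); B makes one forward pass that copies messages into a fresh list while skipping the first couples_to_remove user/assistant couples.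
import Mathlib
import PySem

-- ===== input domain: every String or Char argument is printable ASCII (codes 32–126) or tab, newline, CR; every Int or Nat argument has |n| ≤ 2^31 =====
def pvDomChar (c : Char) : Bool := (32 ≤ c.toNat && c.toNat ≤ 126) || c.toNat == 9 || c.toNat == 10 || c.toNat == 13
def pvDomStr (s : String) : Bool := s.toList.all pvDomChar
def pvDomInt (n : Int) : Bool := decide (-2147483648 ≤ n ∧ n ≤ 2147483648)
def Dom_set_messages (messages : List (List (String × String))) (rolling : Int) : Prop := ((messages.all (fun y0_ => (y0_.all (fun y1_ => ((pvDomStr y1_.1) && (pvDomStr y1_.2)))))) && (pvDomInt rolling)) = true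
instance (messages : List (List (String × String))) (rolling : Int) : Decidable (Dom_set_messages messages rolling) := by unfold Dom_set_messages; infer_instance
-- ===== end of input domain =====

-- B replaces A's repeated in-place deletion (each `del` shifts the tail) by a single forward
-- pass that copies kept messages into a fresh list, skipping the first couples_to_remove
-- user/assistant couples (objective: alternative one-pass algorithm). A mutates `messages`
-- in place and returns it; B builds a new list — the equivalence proved here is about the
-- RETURN value only.

-- d["role"] / d.get("role"): first-match lookup in the association list (dict)
def pvRole (d : List (String × String)) : Option String := PySem.Dict.get? ⟨d⟩ "role"

-- ===== PORT A =====
-- the while loop; fuel only makes the recursion structural (2*len+2 bounds the number of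
-- iterations of any terminating run); `none` = the Python raised (IndexError / KeyError),
-- excluded by Pre_ below
def pvLoopA (fuel : Nat) (msgs : List (List (String × String))) (target removed index : Int) :
    Option (List (List (String × String))) :=
  match fuel with
  | 0 => none
  | Nat.succ fuel =>
    if removed < target then
      match PySem.List.pyGet? msgs index with
      | none => none
      | some d =>
        match pvRole d with
        | none => none
        | some r1 =>
          if r1 = "user" then
            match PySem.List.pyGet? msgs (index + 1) with
            | none => none
            | some d2 =>
              match pvRole d2 with
              | none => none
              | some r2 =>
                if r2 = "assistant" then
                  match PySem.List.pop? msgs index with      -- del messages[index]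
                  | none => none
                  | some p1 =>
                    match PySem.List.pop? p1.2 index with    -- del messages[index]
                    | none => none
                    | some p2 => pvLoopA fuel p2.2 target (removed + 1) index
                else pvLoopA fuel msgs target removed (index + 1)
          else pvLoopA fuel msgs target removed (index + 1)
    else some msgs

def set_messages (messages : List (List (String × String))) (rolling : Int) :
    List (List (String × String)) :=
  let num_entries : Int := messages.length
  let num_couples := PySem.Int.floordiv (num_entries - 1) 2
  if num_couples ≤ rolling then messages
  else (pvLoopA (2 * messages.length + 2) messages (num_couples - rolling) 0 1).getD messages

-- ===== PORT B =====
-- single forward pass: copy messages, skipping the first to_remove user/assistant couples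
def pvLoopB (msgs : List (List (String × String))) (toRemove : Int)
    (out : List (List (String × String))) (i : Nat) : List (List (String × String)) :=
  if h : i < msgs.length then
    if hc : 0 < toRemove ∧ 1 ≤ i ∧ i + 1 < msgs.length then
      if pvRole (msgs[i]'h) = some "user" ∧ pvRole (msgs[i+1]'hc.2.2) = some "assistant" then
        pvLoopB msgs (toRemove - 1) out (i + 2)
      else pvLoopB msgs toRemove (out ++ [msgs[i]'h]) (i + 1)
    else pvLoopB msgs toRemove (out ++ [msgs[i]'h]) (i + 1)
  else out
termination_by msgs.length - i

def set_messages_alt (messages : List (List (String × String))) (rolling : Int) :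
    List (List (String × String)) :=
  let num_couples := PySem.Int.floordiv ((messages.length : Int) - 1) 2
  if num_couples ≤ rolling then messages
  else pvLoopB messages (num_couples - rolling) [] 0

-- ===== PRECONDITION & SPEC =====
-- Pre_: either A returns messages unchanged (num_couples ≤ rolling), or rolling ≥ 0 and the
-- first couples_to_remove couples after the head are well-formed (role "user" then role
-- "assistant"), so A's loop never enters its scanning else-branch.  This excludes the inputs
-- where A RAISES (not enough matching couples: IndexError/KeyError), and also some irregular
-- role sequences on which A still returns after scanning past non-matching entries; on those
-- excluded-but-returning inputs B computes the same value (see cites), the shape is simply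
-- not the alternating couple shape the chatbot maintains and not closed-form without
-- replaying A's scan.
def Pre_set_messages (messages : List (List (String × String))) (rolling : Int) : Prop :=
  let c := PySem.Int.floordiv ((messages.length : Int) - 1) 2
  c ≤ rolling ∨ (0 ≤ rolling ∧ ∀ i < (c - rolling).toNat,
    (messages[1 + 2 * i]?).bind pvRole = some "user" ∧
    (messages[2 + 2 * i]?).bind pvRole = some "assistant")

instance (messages : List (List (String × String))) (rolling : Int) :
    Decidable (Pre_set_messages messages rolling) := by unfold Pre_set_messages; infer_instance

def pvWitness_set_messages : (List (List (String × String))) × Int :=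
  ([[("role", "system")], [("role", "user")], [("role", "assistant")]], 0)

def Spec_set_messages (messages : List (List (String × String))) (rolling : Int)
    (out : List (List (String × String))) : Prop := out = set_messages_alt messages rolling
instance (messages : List (List (String × String))) (rolling : Int) (out : List (List (String × String))) : Decidable (Spec_set_messages messages rolling out) := by unfold Spec_set_messages; infer_instance

-- ===== CLAIM (what is proved, stated in full; the proofs are below) =====
def Claim_equal_set_messages : Prop := ∀ (messages : List (List (String × String))) (rolling : Int), Dom_set_messages messages rolling → Pre_set_messages messages rolling → Spec_set_messages messages rolling (set_messages messages rolling)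

-- ===== LEMMAS AND PROOFS =====

-- the first k couples after the head are well-formed (same formula as Pre_'s second branch)
def pvStruct (k : Nat) (msgs : List (List (String × String))) : Prop :=
  ∀ i < k, (msgs[1 + 2 * i]?).bind pvRole = some "user" ∧
           (msgs[2 + 2 * i]?).bind pvRole = some "assistant"

lemma pvLoopA_run : ∀ (k fuel : Nat) (msgs : List (List (String × String))) (t r : Int),
    (t - r).toNat = k → k + 1 ≤ fuel → 1 + 2 * k ≤ msgs.length → pvStruct k msgs →
    pvLoopA fuel msgs t r 1 = some (msgs.take 1 ++ msgs.drop (1 + 2 * k)) := by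
  intro k
  induction k with
  | zero =>
    intro fuel msgs t r ht hf hlen _
    obtain ⟨f, rfl⟩ : ∃ f, fuel = f + 1 := ⟨fuel - 1, by omega⟩
    rw [pvLoopA, if_neg (by omega)]
    rw [show 1 + 2*0 = 1 from rfl, List.take_append_drop]
  | succ k ih =>
    intro fuel msgs t r ht hf hlen hs
    obtain ⟨f, rfl⟩ : ∃ f, fuel = f + 1 := ⟨fuel - 1, by omega⟩
    rcases msgs with _ | ⟨m0, _ | ⟨u, _ | ⟨a, rest⟩⟩⟩ <;> simp at hlen <;> try omega
    have hu := (hs 0 (by omega)).1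
    have ha := (hs 0 (by omega)).2
    simp only [show (1:Nat) + 2*0 = 1 from rfl, show (2:Nat) + 2*0 = 2 from rfl,
      List.getElem?_cons_succ, List.getElem?_cons_zero, Option.bind_some] at hu ha
    have hg1 : PySem.List.pyGet? (m0 :: u :: a :: rest) 1 = some u := by
      simp [PySem.List.pyGet?, PySem.List.pyIdx?, show (0:Int) ≤ (rest.length:Int) + 1 by omega]
    have hg2 : PySem.List.pyGet? (m0 :: u :: a :: rest) (1 + 1) = some a := by
      simp [PySem.List.pyGet?, PySem.List.pyIdx?, show (2:Int) ≤ (rest.length:Int) + 1 + 1 by omega,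
        show (0:Int) ≤ (rest.length:Int) + 1 + 1 by omega]
    have hp1 : PySem.List.pop? (m0 :: u :: a :: rest) 1 = some (u, m0 :: a :: rest) := by
      rw [show (1:Int) = ((1:Nat):Int) by norm_num,
        PySem.List.pop?_natCast _ 1 (by simp)]
      simp [List.eraseIdx]
    have hp2 : PySem.List.pop? (m0 :: a :: rest) 1 = some (a, m0 :: rest) := by
      rw [show (1:Int) = ((1:Nat):Int) by norm_num,
        PySem.List.pop?_natCast _ 1 (by simp)]
      simp [List.eraseIdx]
    rw [pvLoopA, if_pos (by omega)]
    simp only [hg1, hu, hg2, ha, hp1, hp2, if_pos, String.reduceEq, reduceIte]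
    rw [ih f (m0 :: rest) t (r + 1) (by omega) (by omega) (by simp; omega) ?_]
    · simp only [List.drop_succ_cons,
        show 1 + 2*(k+1) = (2*k+1)+1+1 from by omega, show 1 + 2*k = (2*k)+1 from by omega]
      simp
    · intro i hi
      have := hs (i + 1) (by omega)
      simp only [show 1 + 2*(i+1) = (2*i+2)+1 from by omega, show 2 + 2*(i+1) = (2*i+3)+1 from by omega,
        show 2*i+3 = (2*i+2)+1 from rfl, show 2*i+2 = (2*i+1)+1 from rfl, show 2*i+1 = (2*i)+1 from rfl,
        List.getElem?_cons_succ] at this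
      simpa [show 1 + 2*i = (2*i)+1 from by omega, show 2 + 2*i = (2*i)+1+1 from by omega,
        List.getElem?_cons_succ] using this

lemma pvLoopB_copy (msgs : List (List (String × String))) (t : Int) (out : List (List (String × String))) (i : Nat)
    (ht : t ≤ 0) : pvLoopB msgs t out i = out ++ msgs.drop i := by
  by_cases h : i < msgs.length
  · rw [pvLoopB, dif_pos h, dif_neg (by omega : ¬(0 < t ∧ 1 ≤ i ∧ i + 1 < msgs.length)),
      pvLoopB_copy msgs t (out ++ [msgs[i]'h]) (i+1) ht,
      List.drop_eq_getElem_cons h]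
    simp
  · rw [pvLoopB, dif_neg h, List.drop_of_length_le (by omega)]
    simp
termination_by msgs.length - i

lemma pvLoopB_run : ∀ (d j : Nat) (msgs : List (List (String × String))) (t : Int) (out : List (List (String × String))),
    t.toNat = d → pvStruct (j + d) msgs → 1 + 2 * (j + d) ≤ msgs.length →
    pvLoopB msgs t out (1 + 2 * j) = out ++ msgs.drop (1 + 2 * (j + d)) := by
  intro d
  induction d with
  | zero => intro j msgs t out ht _ _; exact pvLoopB_copy msgs t out _ (by omega)
  | succ d ih =>
    intro j msgs t out ht hs hlen
    have hi : 1 + 2 * j < msgs.length := by omega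
    have hi1 : 1 + 2 * j + 1 < msgs.length := by omega
    have hu := (hs j (by omega)).1
    have ha := (hs j (by omega)).2
    rw [List.getElem?_eq_getElem hi] at hu
    rw [show 2 + 2 * j = (1 + 2 * j) + 1 by omega, List.getElem?_eq_getElem hi1] at ha
    simp only [Option.bind_some] at hu ha
    rw [pvLoopB, dif_pos hi, dif_pos ⟨by omega, by omega, hi1⟩, if_pos ⟨hu, ha⟩,
      show 1 + 2 * j + 2 = 1 + 2 * (j + 1) by omega,
      ih (j+1) msgs (t-1) out (by omega) (by rw [show j + 1 + d = j + (d+1) by omega]; exact hs) (by omega)]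
    rw [show j + 1 + d = j + (d+1) by omega]

-- ===== VERDICT (by name: the statement is the Claim_ definition above) =====
theorem set_messages_spec : Claim_equal_set_messages := by
  intro msgs rolling _ hpre
  have hcq := (PySem.Int.floordiv_eq_iff_of_pos (by norm_num : (0:Int) < 2)).mp
    (rfl : PySem.Int.floordiv ((msgs.length : Int) - 1) 2
         = PySem.Int.floordiv ((msgs.length : Int) - 1) 2)
  unfold Pre_set_messages at hpre
  unfold Spec_set_messages set_messages set_messages_alt
  set c := PySem.Int.floordiv ((msgs.length : Int) - 1) 2 with hcdef
  simp only [] at hpre ⊢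
  by_cases hc : c ≤ rolling
  · rw [if_pos hc, if_pos hc]
  · rw [if_neg hc, if_neg hc]
    obtain ⟨hr0, hstruct⟩ := hpre.resolve_left hc
    have hrc : rolling < c := lt_of_not_ge hc
    set k := (c - rolling).toNat with hk
    have hlen : 1 + 2 * k ≤ msgs.length := by omega
    have hstruct' : pvStruct k msgs := fun i hi => hstruct i hi
    rw [pvLoopA_run k (2 * msgs.length + 2) msgs (c - rolling) 0 (by omega) (by omega) hlen
      hstruct', Option.getD_some]
    rcases msgs with _ | ⟨m0, tl⟩
    · simp at hlen
    · rw [pvLoopB, dif_pos (by simp : 0 < (m0 :: tl).length),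
        dif_neg (by omega : ¬(0 < c - rolling ∧ 1 ≤ 0 ∧ 0 + 1 < (m0 :: tl).length)),
        show (0:Nat) + 1 = 1 + 2 * 0 from rfl,
        pvLoopB_run k 0 (m0 :: tl) (c - rolling) _ (by omega)
          (by simpa using hstruct') (by simpa using hlen)]
      simp
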